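-- pv_equiv track=rewrite | github.com/KillianCastella/Puzzle | findCornersShiTomasi.py | density
-- ===== SOURCE A (Python) =====
-- def density(data, w, h):
--     '''Méthode séparant les points par quadrans et comptant le nombre dans chacun'''
--     q = [0, 0, 0, 0]
--     q1 = []
--     q2 = []
--     q3 = []
--     q4 = []
--     for i in data:
--         if 0 <= i[0] < w/2:
--             if 0 <= i[1] < h/2:
--                 q[0] += 1
--                 q1.append(i)
--             if h / 2 <= i[1] <= h:
--                 q[3] += 1
--                 q4.append(i)
--         elif w/2 <= i[0] <= w:
--             if 0 <= i[1] < h / 2: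
--                 q[1] += 1
--                 q2.append(i)
--             if h / 2 <= i[1] <= h:
--                 q[2] += 1
--                 q3.append(i)
--     return q, q1, q2, q3, q4
-- ===== SOURCE B (Python) =====
-- def density(data, w, h):
--     '''Staged rewrite: each quadrant is extracted by its own filter pass; counts are lengths.'''
--     q1 = [p for p in data if 0 <= p[0] and 2 * p[0] < w and 0 <= p[1] and 2 * p[1] < h]
--     q2 = [p for p in data if w <= 2 * p[0] and p[0] <= w and 0 <= p[1] and 2 * p[1] < h]
--     q3 = [p for p in data if w <= 2 * p[0] and p[0] <= w and h <= 2 * p[1] and p[1] <= h]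
--     q4 = [p for p in data if 0 <= p[0] and 2 * p[0] < w and h <= 2 * p[1] and p[1] <= h]
--     return [len(q1), len(q2), len(q3), len(q4)], q1, q2, q3, q4
-- ===== Notes on version B (the rewrite author's own statement) =====
-- stated objective: alternative
-- what changed: Replaced A's single stateful loop with nested count-and-append branches by four independent filter passes, one closed-form predicate per quadrant, with counts obtained as lengths.
import Mathlib
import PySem

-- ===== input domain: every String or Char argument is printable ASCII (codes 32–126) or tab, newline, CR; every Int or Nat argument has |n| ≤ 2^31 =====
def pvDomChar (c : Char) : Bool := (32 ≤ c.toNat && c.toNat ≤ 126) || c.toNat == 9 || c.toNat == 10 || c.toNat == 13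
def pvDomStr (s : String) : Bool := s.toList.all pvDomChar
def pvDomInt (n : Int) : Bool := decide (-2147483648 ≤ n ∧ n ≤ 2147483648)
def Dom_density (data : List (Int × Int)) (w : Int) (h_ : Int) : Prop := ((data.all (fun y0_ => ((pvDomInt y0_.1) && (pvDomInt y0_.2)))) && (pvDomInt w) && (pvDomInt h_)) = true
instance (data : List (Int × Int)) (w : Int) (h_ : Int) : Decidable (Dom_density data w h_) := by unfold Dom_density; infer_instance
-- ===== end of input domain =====

-- B replaces A's single stateful count-and-append loop by four independent filter
-- passes, one predicate per quadrant, with counts recovered as lengths ('alternative', same cost).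

-- ===== PORT A =====
-- A's loop body; x < w/2 (Python true division of ints) is exactly 2*x < w, and w/2 <= x is exactly w <= 2*x.
def densityStep (w h_ : Int)
    (st : Int × Int × Int × Int × List (Int × Int) × List (Int × Int) × List (Int × Int) × List (Int × Int))
    (i : Int × Int) :
    Int × Int × Int × Int × List (Int × Int) × List (Int × Int) × List (Int × Int) × List (Int × Int) :=
  let (c0, c1, c2, c3, q1, q2, q3, q4) := st
  if 0 ≤ i.1 ∧ 2 * i.1 < w then
    let (c0', q1') := if 0 ≤ i.2 ∧ 2 * i.2 < h_ then (c0 + 1, q1 ++ [i]) else (c0, q1)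
    let (c3', q4') := if h_ ≤ 2 * i.2 ∧ i.2 ≤ h_ then (c3 + 1, q4 ++ [i]) else (c3, q4)
    (c0', c1, c2, c3', q1', q2, q3, q4')
  else if w ≤ 2 * i.1 ∧ i.1 ≤ w then
    let (c1', q2') := if 0 ≤ i.2 ∧ 2 * i.2 < h_ then (c1 + 1, q2 ++ [i]) else (c1, q2)
    let (c2', q3') := if h_ ≤ 2 * i.2 ∧ i.2 ≤ h_ then (c2 + 1, q3 ++ [i]) else (c2, q3)
    (c0, c1', c2', c3, q1, q2', q3', q4)
  else st

def density (data : List (Int × Int)) (w : Int) (h_ : Int) : List Int × (List (Int × Int)) × (List (Int × Int)) × (List (Int × Int)) × (List (Int × Int)) :=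
  let s := data.foldl (densityStep w h_) (0, 0, 0, 0, [], [], [], [])
  ([s.1, s.2.1, s.2.2.1, s.2.2.2.1], s.2.2.2.2.1, s.2.2.2.2.2.1, s.2.2.2.2.2.2.1, s.2.2.2.2.2.2.2)

-- ===== PORT B =====
-- B's four quadrant predicates (one per list comprehension in Source B).
def inQ1 (w h_ : Int) (p : Int × Int) : Bool := 0 ≤ p.1 && 2 * p.1 < w && 0 ≤ p.2 && 2 * p.2 < h_
def inQ2 (w h_ : Int) (p : Int × Int) : Bool := w ≤ 2 * p.1 && p.1 ≤ w && 0 ≤ p.2 && 2 * p.2 < h_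
def inQ3 (w h_ : Int) (p : Int × Int) : Bool := w ≤ 2 * p.1 && p.1 ≤ w && h_ ≤ 2 * p.2 && p.2 ≤ h_
def inQ4 (w h_ : Int) (p : Int × Int) : Bool := 0 ≤ p.1 && 2 * p.1 < w && h_ ≤ 2 * p.2 && p.2 ≤ h_

def density_alt (data : List (Int × Int)) (w : Int) (h_ : Int) : List Int × (List (Int × Int)) × (List (Int × Int)) × (List (Int × Int)) × (List (Int × Int)) :=
  let q1 := data.filter (inQ1 w h_)
  let q2 := data.filter (inQ2 w h_)
  let q3 := data.filter (inQ3 w h_)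
  let q4 := data.filter (inQ4 w h_)
  ([(q1.length : Int), (q2.length : Int), (q3.length : Int), (q4.length : Int)], q1, q2, q3, q4)

-- ===== PRECONDITION & SPEC =====
def Spec_density (data : List (Int × Int)) (w : Int) (h_ : Int) (out : List Int × (List (Int × Int)) × (List (Int × Int)) × (List (Int × Int)) × (List (Int × Int))) : Prop := out = density_alt data w h_
instance (data : List (Int × Int)) (w : Int) (h_ : Int) (out : List Int × (List (Int × Int)) × (List (Int × Int)) × (List (Int × Int)) × (List (Int × Int))) : Decidable (Spec_density data w h_ out) := by unfold Spec_density; infer_instance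

-- ===== CLAIM (what is proved, stated in full; the proofs are below) =====
def Claim_equal_density : Prop := ∀ (data : List (Int × Int)) (w : Int) (h_ : Int), Dom_density data w h_ → Spec_density data w h_ (density data w h_)

-- ===== LEMMAS AND PROOFS =====

-- A's step, expressed through B's four quadrant predicates.
theorem step_eq (w h_ : Int)
    (st : Int × Int × Int × Int × List (Int × Int) × List (Int × Int) × List (Int × Int) × List (Int × Int))
    (p : Int × Int) :
    densityStep w h_ st p =
      (st.1 + (if inQ1 w h_ p then 1 else 0),
       st.2.1 + (if inQ2 w h_ p then 1 else 0),
       st.2.2.1 + (if inQ3 w h_ p then 1 else 0),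
       st.2.2.2.1 + (if inQ4 w h_ p then 1 else 0),
       st.2.2.2.2.1 ++ (if inQ1 w h_ p then [p] else []),
       st.2.2.2.2.2.1 ++ (if inQ2 w h_ p then [p] else []),
       st.2.2.2.2.2.2.1 ++ (if inQ3 w h_ p then [p] else []),
       st.2.2.2.2.2.2.2 ++ (if inQ4 w h_ p then [p] else [])) := by
  obtain ⟨c0, c1, c2, c3, a1, a2, a3, a4⟩ := st
  simp only [densityStep, inQ1, inQ2, inQ3, inQ4, Bool.and_eq_true, decide_eq_true_eq]
  split_ifs <;> simp_all <;> omega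

-- A's fold from an arbitrary state appends exactly the four quadrant filters and adds their lengths.
theorem fold_filter (w h_ : Int) : ∀ (data : List (Int × Int))
    (c0 c1 c2 c3 : Int) (a1 a2 a3 a4 : List (Int × Int)),
    data.foldl (densityStep w h_) (c0, c1, c2, c3, a1, a2, a3, a4) =
      (c0 + ((data.filter (inQ1 w h_)).length : Int),
       c1 + ((data.filter (inQ2 w h_)).length : Int),
       c2 + ((data.filter (inQ3 w h_)).length : Int),
       c3 + ((data.filter (inQ4 w h_)).length : Int),
       a1 ++ data.filter (inQ1 w h_),
       a2 ++ data.filter (inQ2 w h_),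
       a3 ++ data.filter (inQ3 w h_),
       a4 ++ data.filter (inQ4 w h_)) := by
  intro data
  induction data with
  | nil => intro c0 c1 c2 c3 a1 a2 a3 a4; simp
  | cons p rest ih =>
    intro c0 c1 c2 c3 a1 a2 a3 a4
    simp only [List.foldl_cons, List.filter_cons, step_eq]
    rw [ih]
    by_cases h1 : inQ1 w h_ p <;> by_cases h2 : inQ2 w h_ p <;>
      by_cases h3 : inQ3 w h_ p <;> by_cases h4 : inQ4 w h_ p <;>
      simp [h1, h2, h3, h4] <;> omega

-- ===== VERDICT (by name: the statement is the Claim_ definition above) =====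
theorem density_spec : Claim_equal_density := by
  intro data w h_ _
  unfold Spec_density density density_alt
  rw [fold_filter]
  simp
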